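-- pv_equiv track=rewrite | github.com/EuitaeKim/Code_practice_BOJ | 2021.10/07.py | make_list
-- ===== SOURCE A (Python) =====
-- def make_list(n_list, N, start = 0) :
--     for i in range(start, N) :
--         j = str(i)
--         j_sum = 0
--         for k in j :
--             j_sum += int(k)
--         n_list[i] = i + j_sum
--     return n_list
-- ===== SOURCE B (Python) =====
-- def make_list(n_list, N, start=0):
--     # incrementally maintained digit sum: seed it once, then update by carry propagation
--     s = 0
--     t = start
--     while t > 0:
--         s += t % 10
--         t //= 10
--     i = start
--     while i < N:
--         n_list[i] = i + s
--         s += 1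
--         t = i + 1
--         while t % 10 == 0 and t > 0:
--             s -= 9
--             t //= 10
--         i += 1
--     return n_list
-- ===== Notes on version B (the rewrite author's own statement) =====
-- stated objective: faster
-- what changed: B drops the per-element str() conversion and inner digit loop and instead maintains the running digit sum incrementally, updating it in O(1) amortized per step by carry propagation (subtract 9 per trailing zero of i+1).
import Mathlib
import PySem

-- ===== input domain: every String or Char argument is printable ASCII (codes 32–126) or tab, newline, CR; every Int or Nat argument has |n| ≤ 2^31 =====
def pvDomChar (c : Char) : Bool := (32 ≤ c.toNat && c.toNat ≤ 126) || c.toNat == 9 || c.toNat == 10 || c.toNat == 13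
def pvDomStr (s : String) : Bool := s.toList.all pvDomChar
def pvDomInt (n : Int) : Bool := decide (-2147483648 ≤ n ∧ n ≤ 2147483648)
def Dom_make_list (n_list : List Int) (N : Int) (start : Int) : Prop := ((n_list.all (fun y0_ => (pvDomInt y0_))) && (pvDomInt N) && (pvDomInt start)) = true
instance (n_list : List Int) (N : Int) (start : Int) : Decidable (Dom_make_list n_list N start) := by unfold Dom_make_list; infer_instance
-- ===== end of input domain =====

-- B replaces A's per-element str()/digit loop by an incrementally maintained digit sum
-- (carry propagation), asymptotically faster; both mutate n_list in place identically,
-- the equivalence proved is about the returned list.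


-- termination helper used by the ports of B's while-loops
theorem pv_floordiv10_toNat_lt (t : Int) (h : 0 < t) :
    (PySem.Int.floordiv t 10).toNat < t.toNat := by
  obtain ⟨m, rfl⟩ : ∃ m : Nat, t = (m : Int) := ⟨t.toNat, by omega⟩
  have h2 : PySem.Int.floordiv ((m : Int)) 10 = ((m / 10 : Nat) : Int) := by
    exact_mod_cast PySem.Int.floordiv_natCast m 10
  rw [h2]
  have h3 : m / 10 < m := Nat.div_lt_self (by exact_mod_cast h) (by norm_num)
  omega

-- ===== PORT A =====
def make_list (n_list : List Int) (N : Int) (start : Int) : List Int :=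
  (PySem.List.pyRange start N 1).foldl (fun acc i =>
    let j := PySem.Int.toChars i
    let j_sum := j.foldl (fun s k => s + (PySem.Int.ofChars? [k]).getD 0) (0 : Int)
    PySem.List.pySetD acc i (i + j_sum)) n_list

-- ===== PORT B =====
-- the seeding loop: while t > 0: s += t % 10; t //= 10
def pvDsumLoop (t s : Int) : Int :=
  if h : 0 < t then pvDsumLoop (PySem.Int.floordiv t 10) (s + PySem.Int.mod t 10) else s
termination_by t.toNat
decreasing_by exact pv_floordiv10_toNat_lt t h

-- the carry loop: while t % 10 == 0 and t > 0: s -= 9; t //= 10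
def pvCarry (t s : Int) : Int :=
  if h : PySem.Int.mod t 10 = 0 ∧ 0 < t then pvCarry (PySem.Int.floordiv t 10) (s - 9) else s
termination_by t.toNat
decreasing_by exact pv_floordiv10_toNat_lt t h.2

-- the main loop: while i < N: n_list[i] = i + s; s += 1; carry; i += 1
def pvLoopB (N : Int) (acc : List Int) (i s : Int) : List Int :=
  if h : i < N then
    pvLoopB N (PySem.List.pySetD acc i (i + s)) (i + 1) (pvCarry (i + 1) (s + 1))
  else acc
termination_by (N - i).toNat
decreasing_by omega

def make_list_alt (n_list : List Int) (N : Int) (start : Int) : List Int :=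
  pvLoopB N n_list start (pvDsumLoop start 0)

-- ===== PRECONDITION & SPEC =====
-- Pre_ excludes exactly the inputs on which A raises: when the range is nonempty, a
-- negative start makes int('-') raise ValueError and N beyond len(n_list) makes the
-- item assignment raise IndexError.
def Pre_make_list (n_list : List Int) (N : Int) (start : Int) : Prop :=
  start < N → 0 ≤ start ∧ N ≤ (n_list.length : Int)
instance (n_list : List Int) (N : Int) (start : Int) : Decidable (Pre_make_list n_list N start) := by
  unfold Pre_make_list; infer_instance

def pvWitness_make_list : List Int × Int × Int := ([7, 7, 7, 7, 7], 4, 1)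

def Spec_make_list (n_list : List Int) (N : Int) (start : Int) (out : List Int) : Prop := out = make_list_alt n_list N start
instance (n_list : List Int) (N : Int) (start : Int) (out : List Int) : Decidable (Spec_make_list n_list N start out) := by unfold Spec_make_list; infer_instance

-- ===== CLAIM (what is proved, stated in full; the proofs are below) =====
def Claim_equal_make_list : Prop := ∀ (n_list : List Int) (N : Int) (start : Int), Dom_make_list n_list N start → Pre_make_list n_list N start → Spec_make_list n_list N start (make_list n_list N start)

-- ===== LEMMAS AND PROOFS =====

-- reference digit sum on Nat
def pvDsN (n : Nat) : Int :=
  if h : n < 10 then (n : Int) else pvDsN (n / 10) + ((n % 10 : Nat) : Int)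
decreasing_by exact Nat.div_lt_self (by omega) (by norm_num)

theorem pvDsN_rec (n : Nat) : pvDsN n = pvDsN (n / 10) + ((n % 10 : Nat) : Int) := by
  by_cases h : n < 10
  · rw [pvDsN]
    simp only [h, dif_pos]
    rw [Nat.div_eq_of_lt h, Nat.mod_eq_of_lt h]
    simp [pvDsN]
  · rw [pvDsN]; simp [h]

-- value of a single digit character under int(k)
def pvCharVal (k : Char) : Int := (PySem.Int.ofChars? [k]).getD 0

theorem pvCharVal_digitChar (d : Nat) (hd : d < 10) :
    pvCharVal (Nat.digitChar d) = (d : Int) := by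
  interval_cases d <;> decide

-- the digit characters produced by Nat.toDigits, as a structural recursion
def pvDigitsChars (n : Nat) : List Char :=
  if h : n < 10 then [Nat.digitChar n]
  else pvDigitsChars (n / 10) ++ [Nat.digitChar (n % 10)]
decreasing_by exact Nat.div_lt_self (by omega) (by norm_num)

theorem pvToDigitsCore_eq (fuel : Nat) :
    ∀ (n : Nat) (rest : List Char), n < fuel →
      Nat.toDigitsCore 10 fuel n rest = pvDigitsChars n ++ rest := by
  induction fuel with
  | zero => intro n rest h; omega
  | succ f ih =>
    intro n rest h
    rw [Nat.toDigitsCore]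
    by_cases h10 : n / 10 = 0
    · have hn : n < 10 := by omega
      rw [if_pos h10, pvDigitsChars]
      simp [hn, Nat.mod_eq_of_lt hn]
    · have hn : ¬ n < 10 := by
        intro hc; exact h10 (Nat.div_eq_of_lt hc)
      rw [if_neg h10, ih (n / 10) _ (by omega)]
      conv_rhs => rw [pvDigitsChars]
      simp [hn]

theorem pvFoldl_digitsChars (n : Nat) :
    ∀ c : Int, (pvDigitsChars n).foldl (fun s k => s + pvCharVal k) c = c + pvDsN n := by
  induction n using Nat.strong_induction_on with
  | _ n ih =>
    intro c
    by_cases h : n < 10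
    · rw [pvDigitsChars, pvDsN]
      simp [h, List.foldl, pvCharVal_digitChar n h]
    · rw [pvDigitsChars]
      simp only [h, dif_neg, not_false_iff, List.foldl_append]
      rw [ih (n / 10) (Nat.div_lt_self (by omega) (by norm_num)) c]
      simp only [List.foldl, pvCharVal_digitChar (n % 10) (Nat.mod_lt n (by norm_num))]
      rw [pvDsN_rec n]; push_cast; ring

-- A's inner digit-sum computation equals pvDsN, for nonnegative i
theorem pvStrSum_eq (n : Nat) :
    (PySem.Int.toChars (n : Int)).foldl (fun s k => s + (PySem.Int.ofChars? [k]).getD 0) 0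
      = pvDsN n := by
  have h1 : PySem.Int.toChars (n : Int) = Nat.toDigits 10 n := by
    simp [PySem.Int.toChars]
  rw [h1, Nat.toDigits, pvToDigitsCore_eq (n + 1) n [] (by omega), List.append_nil]
  have := pvFoldl_digitsChars n 0
  simpa [pvCharVal] using this

-- B's seeding loop computes pvDsN
theorem pvDsumLoop_eq (n : Nat) : ∀ s : Int, pvDsumLoop (n : Int) s = s + pvDsN n := by
  induction n using Nat.strong_induction_on with
  | _ n ih =>
    intro s
    rw [pvDsumLoop]
    by_cases h : 0 < n
    · have hpos : (0 : Int) < (n : Int) := by exact_mod_cast h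
      rw [dif_pos hpos]
      rw [show PySem.Int.floordiv (n : Int) 10 = ((n / 10 : Nat) : Int) by
            exact_mod_cast PySem.Int.floordiv_natCast n 10,
          show PySem.Int.mod (n : Int) 10 = ((n % 10 : Nat) : Int) by
            exact_mod_cast PySem.Int.mod_natCast n 10]
      rw [ih (n / 10) (Nat.div_lt_self h (by norm_num))]
      rw [pvDsN_rec n]; ring
    · have h0 : n = 0 := by omega
      subst h0
      rw [dif_neg (by norm_num)]
      simp [pvDsN]

-- B's carry loop turns pvDsN n + 1 into pvDsN (n+1)
theorem pvCarry_eq (n : Nat) : pvCarry ((n : Int) + 1) (pvDsN n + 1) = pvDsN (n + 1) := by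
  induction n using Nat.strong_induction_on with
  | _ n ih =>
    have hcast : ((n : Int) + 1) = ((n + 1 : Nat) : Int) := by push_cast; ring
    rw [pvCarry]
    by_cases h : (n + 1) % 10 = 0
    · -- trailing zero: recurse
      have hmod : PySem.Int.mod ((n : Int) + 1) 10 = 0 := by
        rw [hcast, show PySem.Int.mod ((n + 1 : Nat) : Int) 10 = (((n + 1) % 10 : Nat) : Int) by
              exact_mod_cast PySem.Int.mod_natCast (n + 1) 10, h]; norm_num
      have hpos : (0 : Int) < (n : Int) + 1 := by positivity
      rw [dif_pos ⟨hmod, hpos⟩]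
      have hn9 : 9 ≤ n := by omega
      set m := (n + 1) / 10 with hm
      have hm1 : 1 ≤ m := by
        have : 10 ≤ n + 1 := by omega
        exact Nat.le_div_iff_mul_le (by norm_num) |>.mpr (by omega)
      have hmn : n + 1 = 10 * m := by
        have := Nat.div_add_mod (n + 1) 10
        omega
      have hdiv : PySem.Int.floordiv ((n : Int) + 1) 10 = (m : Int) := by
        rw [hcast, show PySem.Int.floordiv ((n + 1 : Nat) : Int) 10 = (((n + 1) / 10 : Nat) : Int) by
              exact_mod_cast PySem.Int.floordiv_natCast (n + 1) 10]
      rw [hdiv]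
      -- pvDsN n = pvDsN (m-1) + 9
      have hnval : n = 10 * (m - 1) + 9 := by omega
      have hdsn : pvDsN n = pvDsN (m - 1) + 9 := by
        rw [pvDsN_rec n]
        have h1 : n / 10 = m - 1 := by omega
        have h2 : n % 10 = 9 := by omega
        rw [h1, h2]; norm_num
      have hrec : pvCarry ((↑(m - 1) : Int) + 1) (pvDsN (m - 1) + 1) = pvDsN ((m - 1) + 1) :=
        ih (m - 1) (by omega)
      have hmc : ((m - 1 : Nat) : Int) + 1 = (m : Int) := by
        have : (m - 1) + 1 = m := by omega
        exact_mod_cast congrArg (fun x : Nat => (x : Int)) this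
      rw [hmc] at hrec
      have hm1' : (m - 1) + 1 = m := by omega
      rw [hm1'] at hrec
      have harg : pvDsN n + 1 - 9 = pvDsN (m - 1) + 1 := by rw [hdsn]; ring
      rw [harg, hrec]
      -- goal: pvDsN m = pvDsN (n+1)
      rw [pvDsN_rec (n + 1)]
      have : (n + 1) / 10 = m := hm.symm
      rw [this, h]; norm_num
    · -- no trailing zero: stop
      have hmod : PySem.Int.mod ((n : Int) + 1) 10 ≠ 0 := by
        rw [hcast, show PySem.Int.mod ((n + 1 : Nat) : Int) 10 = (((n + 1) % 10 : Nat) : Int) by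
              exact_mod_cast PySem.Int.mod_natCast (n + 1) 10]
        exact_mod_cast h
      rw [dif_neg (by tauto)]
      rw [pvDsN_rec (n + 1), pvDsN_rec n]
      have h1 : (n + 1) / 10 = n / 10 := by omega
      have h2 : (n + 1) % 10 = n % 10 + 1 := by omega
      rw [h1, h2]; push_cast; ring

-- B's main loop equals a foldl over the range, carrying pvDsN as invariant
theorem pvLoopB_eq (N : Int) :
    ∀ (k : Nat) (n : Nat) (acc : List Int), (N - (n : Int)).toNat ≤ k →
      pvLoopB N acc (n : Int) (pvDsN n)
        = (PySem.List.pyRange (n : Int) N 1).foldl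
            (fun a j => PySem.List.pySetD a j (j + pvDsN j.toNat)) acc := by
  intro k
  induction k with
  | zero =>
    intro n acc hk
    have h : ¬ ((n : Int) < N) := by omega
    rw [pvLoopB, dif_neg h, PySem.List.pyRange_one_eq_nil (by omega)]
    rfl
  | succ k ih =>
    intro n acc hk
    by_cases h : (n : Int) < N
    · rw [pvLoopB, dif_pos h]
      rw [PySem.List.pyRange_one_cons h, List.foldl_cons]
      have hc : pvCarry ((n : Int) + 1) (pvDsN n + 1) = pvDsN (n + 1) := pvCarry_eq n
      have hcast : ((n : Int) + 1) = ((n + 1 : Nat) : Int) := by push_cast; ring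
      have htn : ((n : Int)).toNat = n := Int.toNat_natCast n
      rw [htn, hc, hcast, ih (n + 1) _ (by omega)]
    · rw [pvLoopB, dif_neg h, PySem.List.pyRange_one_eq_nil (by omega)]
      rfl

-- ===== VERDICT (by name: the statement is the Claim_ definition above) =====
theorem make_list_spec : Claim_equal_make_list := by
  intro n_list N start _hDom hPre
  unfold Spec_make_list make_list make_list_alt
  by_cases hlt : start < N
  · obtain ⟨hs, _hN⟩ := hPre hlt
    obtain ⟨n, rfl⟩ : ∃ n : Nat, start = (n : Int) := ⟨start.toNat, by omega⟩
    rw [pvDsumLoop_eq n 0, zero_add,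
        pvLoopB_eq N (N - (n : Int)).toNat n n_list (le_refl _)]
    apply PySem.List.foldl_congr_mem
    intro a j hj
    have hj' : (n : Int) ≤ j ∧ j < N := (PySem.List.mem_pyRange_one.mp hj)
    obtain ⟨m, rfl⟩ : ∃ m : Nat, j = (m : Int) := ⟨j.toNat, by omega⟩
    simp only [Int.toNat_natCast]
    rw [pvStrSum_eq m]
  · rw [pvLoopB, dif_neg hlt, PySem.List.pyRange_one_eq_nil (by omega)]
    rfl
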